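-- pv_equiv track=rewrite | github.com/permissionlesstech/bitchat | scripts/localization/add_missing_comments.py | generate_comment
-- ===== SOURCE A (Python) =====
-- from typing import Dict, Any, Optional
--
-- def infer_category(prefix: str) -> str:
--     """Map key prefixes to a concise category label used in comments."""
--     mapping = {
--         'accessibility': 'Screen reader label',
--         'actions': 'Action label',
--         'alert': 'Alert text',
--         'app': 'App text',
--         'common': 'Common label',
--         'error': 'Error message',
--         'location': 'Location feature text',
--         'nav': 'Navigation title',
--         'placeholder': 'Input placeholder',
--         'security': 'Security status text',
--         'ui': 'UI label',
--     }
--     return mapping.get(prefix, 'App text')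
--
-- def generate_comment(key: str, value_hint: Optional[str]) -> str:
--     """Create a concise developer comment for a given key/value."""
--     # Determine category from prefix
--     prefix = key.split('.', 1)[0] if '.' in key else key
--     category = infer_category(prefix)
--
--     # Identify possible subtype for alert titles/messages, etc.
--     subtype = None
--     lower_key = key.lower()
--     if prefix == 'alert':
--         if any(t in lower_key for t in ('.title', '_title', 'title_')):
--             subtype = 'title'
--         elif any(t in lower_key for t in ('.button', '_button', 'button_')):
--             subtype = 'button'
--         else:
--             subtype = 'message'
--
--     if prefix == 'accessibility':
--         # Accessibility comments read better as "Screen reader ..."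
--         base = 'Screen reader'
--         tail = 'announcement' if any(x in lower_key for x in ('count', 'status', 'updated', 'new_')) else 'label'
--         if value_hint:
--             return f"{base} {tail}: {value_hint}"
--         return f"{base} {tail}"
--
--     if subtype == 'title':
--         if value_hint:
--             return f"Alert title: {value_hint}"
--         return "Alert title"
--     if subtype == 'button':
--         if value_hint:
--             return f"Alert button: {value_hint}"
--         return "Alert button"
--
--     # For placeholders, keep it concise
--     if prefix == 'placeholder':
--         if value_hint:
--             return f"Input placeholder: {value_hint}"
--         return "Input placeholder"
--
--     # For navigation items
--     if prefix == 'nav':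
--         if value_hint:
--             return f"Navigation title: {value_hint}"
--         return "Navigation title"
--
--     # For actions and common labels, prefer button label phrasing when verb-like
--     if prefix in ('actions', 'common', 'ui', 'app', 'security', 'location', 'error'):
--         if value_hint:
--             # If it starts with a verb, call it a button/action label
--             verby = value_hint.strip().split(' ')[0].lower()
--             if verby in {'add', 'save', 'send', 'copy', 'block', 'open', 'show', 'cancel', 'ok', 'retry', 'share', 'delete', 'edit', 'view', 'enable', 'disable', 'join'}:
--                 return f"Button label: {value_hint}"
--             return f"{category}: {value_hint}"
--         return category
--
--     # Default fallback
--     if value_hint: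
--         return f"App text: {value_hint}"
--     return "App text"
-- ===== SOURCE B (Python) =====
-- # Data-driven reimplementation: a declarative first-match rule table replaces A's if-chain.
-- _RULES = [
--     ('accessibility', ('count', 'status', 'updated', 'new_'), 'Screen reader announcement', False),
--     ('accessibility', (), 'Screen reader label', False),
--     ('alert', ('.title', '_title', 'title_'), 'Alert title', False),
--     ('alert', ('.button', '_button', 'button_'), 'Alert button', False),
--     ('placeholder', (), 'Input placeholder', False),
--     ('nav', (), 'Navigation title', False),
--     ('actions', (), 'Action label', True),
--     ('common', (), 'Common label', True),
--     ('ui', (), 'UI label', True),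
--     ('app', (), 'App text', True),
--     ('security', (), 'Security status text', True),
--     ('location', (), 'Location feature text', True),
--     ('error', (), 'Error message', True),
-- ]
--
-- _VERBS = {'add', 'save', 'send', 'copy', 'block', 'open', 'show', 'cancel', 'ok',
--           'retry', 'share', 'delete', 'edit', 'view', 'enable', 'disable', 'join'}
--
-- def generate_comment(key, value_hint):
--     """Scan the rule table for the first matching (prefix, required substrings) rule,
--     then format the resulting (label, verb_aware) pair once."""
--     prefix = key.split('.', 1)[0] if '.' in key else key
--     lk = key.lower()
--     label, verb_aware = 'App text', False
--     for pfx, subs, lbl, verb in _RULES: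
--         if pfx == prefix and (not subs or any(s in lk for s in subs)):
--             label, verb_aware = lbl, verb
--             break
--     if not value_hint:
--         return label
--     if verb_aware and value_hint.strip().split(' ')[0].lower() in _VERBS:
--         return f"Button label: {value_hint}"
--     return f"{label}: {value_hint}"
-- ===== Notes on version B (the rewrite author's own statement) =====
-- stated objective: alternative
-- what changed: B replaces A's hard-coded if-chain (with infer_category dict and an alert subtype variable) by a declarative 13-entry rule table of (prefix, required substrings, label, verb_aware) scanned for the first match, followed by a single formatter.
import Mathlib
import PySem

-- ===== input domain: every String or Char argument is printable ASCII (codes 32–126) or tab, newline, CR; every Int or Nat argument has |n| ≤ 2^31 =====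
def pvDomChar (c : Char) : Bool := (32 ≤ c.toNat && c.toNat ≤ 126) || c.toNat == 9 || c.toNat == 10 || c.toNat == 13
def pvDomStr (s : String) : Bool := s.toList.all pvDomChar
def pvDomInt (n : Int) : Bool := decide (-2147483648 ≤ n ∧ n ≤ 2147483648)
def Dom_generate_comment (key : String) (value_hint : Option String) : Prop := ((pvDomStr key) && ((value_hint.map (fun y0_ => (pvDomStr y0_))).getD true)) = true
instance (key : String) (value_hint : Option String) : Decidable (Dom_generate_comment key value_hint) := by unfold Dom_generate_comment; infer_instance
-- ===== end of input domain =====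

-- B replaces A's if-chain by a declarative first-match rule table (prefix, required substrings,
-- label, verb_aware) scanned once, then a single final formatter (objective: alternative).


-- Python truthiness of an Optional[str]: None and '' are falsy (shared semantics helper)
def pyTruthy (o : Option String) : Bool := (o.getD "") != ""

-- ===== PORT A =====
def infer_category (pfx : String) : String :=
  let mapping : PySem.Dict String String := PySem.Dict.ofList
    [("accessibility", "Screen reader label"), ("actions", "Action label"),
     ("alert", "Alert text"), ("app", "App text"), ("common", "Common label"),
     ("error", "Error message"), ("location", "Location feature text"),
     ("nav", "Navigation title"), ("placeholder", "Input placeholder"),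
     ("security", "Security status text"), ("ui", "UI label")]
  mapping.getD pfx "App text"

def generate_comment (key : String) (value_hint : Option String) : String :=
  let pfx := if PySem.Str.isIn "." key then ((PySem.Str.splitMax? key "." 1).getD []).headD "" else key
  let category := infer_category pfx
  let lower_key := PySem.Str.lower key
  let subtype : Option String :=
    if pfx == "alert" then
      if [".title", "_title", "title_"].any (fun t => PySem.Str.isIn t lower_key) then some "title"
      else if [".button", "_button", "button_"].any (fun t => PySem.Str.isIn t lower_key) then some "button"
      else some "message"
    else none
  if pfx == "accessibility" then
    let base := "Screen reader"
    let tail := if ["count", "status", "updated", "new_"].any (fun x => PySem.Str.isIn x lower_key) then "announcement" else "label"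
    if pyTruthy value_hint then base ++ " " ++ tail ++ ": " ++ value_hint.getD "" else base ++ " " ++ tail
  else if subtype == some "title" then
    if pyTruthy value_hint then "Alert title: " ++ value_hint.getD "" else "Alert title"
  else if subtype == some "button" then
    if pyTruthy value_hint then "Alert button: " ++ value_hint.getD "" else "Alert button"
  else if pfx == "placeholder" then
    if pyTruthy value_hint then "Input placeholder: " ++ value_hint.getD "" else "Input placeholder"
  else if pfx == "nav" then
    if pyTruthy value_hint then "Navigation title: " ++ value_hint.getD "" else "Navigation title"
  else if ["actions", "common", "ui", "app", "security", "location", "error"].contains pfx then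
    if pyTruthy value_hint then
      let verby := PySem.Str.lower (((PySem.Str.split? (PySem.Str.strip (value_hint.getD "")) " ").getD []).headD "")
      if ["add", "save", "send", "copy", "block", "open", "show", "cancel", "ok", "retry", "share", "delete", "edit", "view", "enable", "disable", "join"].contains verby then
        "Button label: " ++ value_hint.getD ""
      else category ++ ": " ++ value_hint.getD ""
    else category
  else
    if pyTruthy value_hint then "App text: " ++ value_hint.getD "" else "App text"

-- ===== PORT B =====
-- declarative first-match rule table: (prefix, required substrings, label, verb_aware)
def pvRules : List (String × List String × String × Bool) :=
  [("accessibility", ["count", "status", "updated", "new_"], "Screen reader announcement", false),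
   ("accessibility", [], "Screen reader label", false),
   ("alert", [".title", "_title", "title_"], "Alert title", false),
   ("alert", [".button", "_button", "button_"], "Alert button", false),
   ("placeholder", [], "Input placeholder", false),
   ("nav", [], "Navigation title", false),
   ("actions", [], "Action label", true),
   ("common", [], "Common label", true),
   ("ui", [], "UI label", true),
   ("app", [], "App text", true),
   ("security", [], "Security status text", true),
   ("location", [], "Location feature text", true),
   ("error", [], "Error message", true)]

def pvVerbs : List String :=
  ["add", "save", "send", "copy", "block", "open", "show", "cancel", "ok", "retry",
   "share", "delete", "edit", "view", "enable", "disable", "join"]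

-- the for-loop with break over the rule table: first matching rule wins
def pvMatch (pfx lk : String) : List (String × List String × String × Bool) → String × Bool
  | [] => ("App text", false)
  | (p, subs, lbl, verb) :: rest =>
      if p == pfx && (subs.isEmpty || subs.any (fun s => PySem.Str.isIn s lk)) then (lbl, verb)
      else pvMatch pfx lk rest

def generate_comment_alt (key : String) (value_hint : Option String) : String :=
  let pfx := if PySem.Str.isIn "." key then ((PySem.Str.splitMax? key "." 1).getD []).headD "" else key
  let lk := PySem.Str.lower key
  let lv := pvMatch pfx lk pvRules
  if !(pyTruthy value_hint) then lv.1
  else if lv.2 && pvVerbs.contains (PySem.Str.lower (((PySem.Str.split? (PySem.Str.strip (value_hint.getD "")) " ").getD []).headD "")) then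
    "Button label: " ++ value_hint.getD ""
  else lv.1 ++ ": " ++ value_hint.getD ""

-- ===== PRECONDITION & SPEC =====
def Spec_generate_comment (key : String) (value_hint : Option String) (out : String) : Prop := out = generate_comment_alt key value_hint
instance (key : String) (value_hint : Option String) (out : String) : Decidable (Spec_generate_comment key value_hint out) := by unfold Spec_generate_comment; infer_instance

-- ===== CLAIM (what is proved, stated in full; the proofs are below) =====
def Claim_equal_generate_comment : Prop := ∀ (key : String) (value_hint : Option String), Dom_generate_comment key value_hint → Spec_generate_comment key value_hint (generate_comment key value_hint)

-- ===== LEMMAS AND PROOFS =====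

-- proof-only helpers: the shared shape of each port's body after its `let` bindings
def pvAbody (pfx lower_key : String) (value_hint : Option String) : String :=
  let category := infer_category pfx
  let subtype : Option String :=
    if pfx == "alert" then
      if [".title", "_title", "title_"].any (fun t => PySem.Str.isIn t lower_key) then some "title"
      else if [".button", "_button", "button_"].any (fun t => PySem.Str.isIn t lower_key) then some "button"
      else some "message"
    else none
  if pfx == "accessibility" then
    let base := "Screen reader"
    let tail := if ["count", "status", "updated", "new_"].any (fun x => PySem.Str.isIn x lower_key) then "announcement" else "label"
    if pyTruthy value_hint then base ++ " " ++ tail ++ ": " ++ value_hint.getD "" else base ++ " " ++ tail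
  else if subtype == some "title" then
    if pyTruthy value_hint then "Alert title: " ++ value_hint.getD "" else "Alert title"
  else if subtype == some "button" then
    if pyTruthy value_hint then "Alert button: " ++ value_hint.getD "" else "Alert button"
  else if pfx == "placeholder" then
    if pyTruthy value_hint then "Input placeholder: " ++ value_hint.getD "" else "Input placeholder"
  else if pfx == "nav" then
    if pyTruthy value_hint then "Navigation title: " ++ value_hint.getD "" else "Navigation title"
  else if ["actions", "common", "ui", "app", "security", "location", "error"].contains pfx then
    if pyTruthy value_hint then
      let verby := PySem.Str.lower (((PySem.Str.split? (PySem.Str.strip (value_hint.getD "")) " ").getD []).headD "")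
      if ["add", "save", "send", "copy", "block", "open", "show", "cancel", "ok", "retry", "share", "delete", "edit", "view", "enable", "disable", "join"].contains verby then
        "Button label: " ++ value_hint.getD ""
      else category ++ ": " ++ value_hint.getD ""
    else category
  else
    if pyTruthy value_hint then "App text: " ++ value_hint.getD "" else "App text"

def pvBbody (pfx lk : String) (value_hint : Option String) : String :=
  let lv := pvMatch pfx lk pvRules
  if !(pyTruthy value_hint) then lv.1
  else if lv.2 && pvVerbs.contains (PySem.Str.lower (((PySem.Str.split? (PySem.Str.strip (value_hint.getD "")) " ").getD []).headD "")) then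
    "Button label: " ++ value_hint.getD ""
  else lv.1 ++ ": " ++ value_hint.getD ""

theorem pvA_eq (key : String) (vh : Option String) :
    generate_comment key vh = pvAbody (if PySem.Str.isIn "." key then ((PySem.Str.splitMax? key "." 1).getD []).headD "" else key) (PySem.Str.lower key) vh := rfl

theorem pvB_eq (key : String) (vh : Option String) :
    generate_comment_alt key vh = pvBbody (if PySem.Str.isIn "." key then ((PySem.Str.splitMax? key "." 1).getD []).headD "" else key) (PySem.Str.lower key) vh := rfl

theorem pv_body_eq (p lk : String) (vh : Option String) : pvAbody p lk vh = pvBbody p lk vh := by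
  unfold pvAbody pvBbody
  by_cases h1 : p = "accessibility"
  · subst h1
    cases ht : pyTruthy vh <;>
      cases hA : ["count", "status", "updated", "new_"].any (fun x => PySem.Str.isIn x lk) <;>
      simp [ht, pvMatch, pvRules] <;> simp_all
  by_cases h2 : p = "alert"
  · subst h2
    cases ht : pyTruthy vh <;>
      cases hT : [".title", "_title", "title_"].any (fun t => PySem.Str.isIn t lk) <;>
      cases hB : [".button", "_button", "button_"].any (fun t => PySem.Str.isIn t lk) <;>
      simp [ht, hT, hB, pvMatch, pvRules] <;> split_ifs <;> simp_all
  by_cases h3 : p = "placeholder"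
  · subst h3; cases ht : pyTruthy vh <;> simp [ht, pvMatch, pvRules]
  by_cases h4 : p = "nav"
  · subst h4; cases ht : pyTruthy vh <;> simp [ht, pvMatch, pvRules]
  by_cases h5 : p = "actions"
  · subst h5; cases ht : pyTruthy vh <;>
      simp [ht, pvMatch, pvRules, pvVerbs, show infer_category "actions" = "Action label" from rfl]
  by_cases h6 : p = "common"
  · subst h6; cases ht : pyTruthy vh <;>
      simp [ht, pvMatch, pvRules, pvVerbs, show infer_category "common" = "Common label" from rfl]
  by_cases h7 : p = "ui"
  · subst h7; cases ht : pyTruthy vh <;>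
      simp [ht, pvMatch, pvRules, pvVerbs, show infer_category "ui" = "UI label" from rfl]
  by_cases h8 : p = "app"
  · subst h8; cases ht : pyTruthy vh <;>
      simp [ht, pvMatch, pvRules, pvVerbs, show infer_category "app" = "App text" from rfl]
  by_cases h9 : p = "security"
  · subst h9; cases ht : pyTruthy vh <;>
      simp [ht, pvMatch, pvRules, pvVerbs, show infer_category "security" = "Security status text" from rfl]
  by_cases h10 : p = "location"
  · subst h10; cases ht : pyTruthy vh <;>
      simp [ht, pvMatch, pvRules, pvVerbs, show infer_category "location" = "Location feature text" from rfl]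
  by_cases h11 : p = "error"
  · subst h11; cases ht : pyTruthy vh <;>
      simp [ht, pvMatch, pvRules, pvVerbs, show infer_category "error" = "Error message" from rfl]
  · cases ht : pyTruthy vh <;>
      simp [ht, pvMatch, pvRules, h1, h2, h3, h4, h5, h6, h7, h8, h9, h10, h11,
            Ne.symm h1, Ne.symm h2, Ne.symm h3, Ne.symm h4, Ne.symm h5, Ne.symm h6,
            Ne.symm h7, Ne.symm h8, Ne.symm h9, Ne.symm h10, Ne.symm h11]

-- ===== VERDICT (by name: the statement is the Claim_ definition above) =====
theorem generate_comment_spec : Claim_equal_generate_comment := by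
  intro key value_hint _
  unfold Spec_generate_comment
  rw [pvA_eq, pvB_eq]
  exact pv_body_eq _ _ _
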